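-- pv_equiv track=rewrite | github.com/marta-gil/vtx-mpas-meshes | vtxmpasmeshes/dataset_utilities.py | find_min_number_wrf_cells
-- ===== SOURCE A (Python) =====
-- def find_min_number_wrf_cells(distance_km=None, resolution_km=None,
--                               previous_domain_cells=0,
--                               margin_cells_each_side=9,
--                               force_buffer=False):
--
--     if distance_km is not None and resolution_km is not None:
--         min_num_cells = int(distance_km / resolution_km)
--     else:
--         min_num_cells = 1
--
--     # num wrf cells has to be odd and multiple of 3.
--     # it also has to be >= 27 and > previous domain num cells / 3 + 18
--
--     if previous_domain_cells > 0:
--         at_least = int(previous_domain_cells / 3 + 2*margin_cells_each_side)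
--         min_num_cells = max(min_num_cells, at_least)
--
--     if force_buffer:
--         smallest_grid = int(2 * margin_cells_each_side)
--         min_num_cells = max(min_num_cells, smallest_grid)
--
--     while not min_num_cells % 2 != 0 or not min_num_cells % 3 == 0:
--         min_num_cells += 1
--
--     return min_num_cells
-- ===== SOURCE B (Python) =====
-- def find_min_number_wrf_cells(distance_km=None, resolution_km=None,
--                               previous_domain_cells=0,
--                               margin_cells_each_side=9,
--                               force_buffer=False):
--     if distance_km is not None and resolution_km is not None:
--         min_num_cells = int(distance_km / resolution_km)
--     else:
--         min_num_cells = 1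
--     if previous_domain_cells > 0:
--         at_least = int(previous_domain_cells / 3 + 2 * margin_cells_each_side)
--         min_num_cells = max(min_num_cells, at_least)
--     if force_buffer:
--         min_num_cells = max(min_num_cells, int(2 * margin_cells_each_side))
--     # odd and multiple of 3 <=> n % 6 == 3: jump there directly
--     return min_num_cells + (3 - min_num_cells) % 6
-- ===== Notes on version B (the rewrite author's own statement) =====
-- stated objective: simpler
-- what changed: The final while loop that increments until the count is odd and a multiple of 3 is replaced by a single closed-form congruence step n += (3 - n) % 6, since 'odd and multiple of 3' is exactly n % 6 == 3.
import Mathlib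
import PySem

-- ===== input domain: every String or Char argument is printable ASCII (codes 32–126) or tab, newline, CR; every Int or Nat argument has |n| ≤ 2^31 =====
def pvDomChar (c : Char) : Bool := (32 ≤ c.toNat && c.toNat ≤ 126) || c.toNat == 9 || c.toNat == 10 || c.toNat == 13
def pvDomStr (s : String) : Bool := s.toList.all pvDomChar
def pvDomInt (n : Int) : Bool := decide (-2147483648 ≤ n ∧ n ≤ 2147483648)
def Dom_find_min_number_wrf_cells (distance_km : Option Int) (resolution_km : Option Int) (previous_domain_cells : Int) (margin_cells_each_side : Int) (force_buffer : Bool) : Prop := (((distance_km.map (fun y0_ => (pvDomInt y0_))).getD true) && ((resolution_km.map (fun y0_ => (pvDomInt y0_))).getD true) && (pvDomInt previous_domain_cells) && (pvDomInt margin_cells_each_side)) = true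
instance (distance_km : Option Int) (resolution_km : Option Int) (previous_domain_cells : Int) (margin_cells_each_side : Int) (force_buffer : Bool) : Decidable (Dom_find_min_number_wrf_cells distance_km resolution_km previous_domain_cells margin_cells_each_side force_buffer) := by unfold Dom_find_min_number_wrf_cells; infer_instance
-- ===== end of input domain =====

-- B replaces A's trailing while loop with the closed-form step n += (3 - n) % 6 (simpler); everything else is unchanged.

-- ===== PORT A =====
-- A's trailing while loop: increment until the count is odd and a multiple of 3.
-- The loop condition is transcribed literally; the fuel only makes the loop total
-- (it never changes the result: the loop fixes m mod 6, so it stops within 6 steps,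
-- proved in pvLoopA_eq below).
def pvLoopA : Nat → Int → Int
  | 0, m => m
  | fuel + 1, m => if ¬ (m % 2 ≠ 0) ∨ ¬ (m % 3 = 0) then pvLoopA fuel (m + 1) else m

-- int(distance_km / resolution_km) and int(previous/3 + 2*margin) use Python float
-- division + truncation toward zero; on Dom (|n| ≤ 2^31) this equals exact integer
-- truncated division, ported as Int.tdiv (int(p/3 + 2m) = tdiv (p + 6m) 3 exactly).
def find_min_number_wrf_cells (distance_km : Option Int) (resolution_km : Option Int) (previous_domain_cells : Int) (margin_cells_each_side : Int) (force_buffer : Bool) : Int :=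
  let min0 : Int :=
    match distance_km, resolution_km with
    | some d, some r => d.tdiv r
    | _, _ => 1
  let min1 : Int :=
    if previous_domain_cells > 0 then
      max min0 ((previous_domain_cells + 6 * margin_cells_each_side).tdiv 3)
    else min0
  let min2 : Int :=
    if force_buffer then max min1 (2 * margin_cells_each_side) else min1
  pvLoopA 6 min2

-- ===== PORT B =====
def find_min_number_wrf_cells_alt (distance_km : Option Int) (resolution_km : Option Int) (previous_domain_cells : Int) (margin_cells_each_side : Int) (force_buffer : Bool) : Int :=
  let min0 : Int :=
    match distance_km with
    | none => 1
    | some d =>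
      match resolution_km with
      | none => 1
      | some r => d.tdiv r
  let min1 : Int :=
    if previous_domain_cells > 0 then
      max min0 ((previous_domain_cells + 6 * margin_cells_each_side).tdiv 3)
    else min0
  let min2 : Int :=
    if force_buffer then max min1 (2 * margin_cells_each_side) else min1
  min2 + (3 - min2) % 6

-- ===== PRECONDITION & SPEC =====
-- Pre_ excludes only the inputs where Python A raises ZeroDivisionError
-- (both distance and resolution given, resolution zero); B raises there too.
def Pre_find_min_number_wrf_cells (distance_km : Option Int) (resolution_km : Option Int) (previous_domain_cells : Int) (margin_cells_each_side : Int) (force_buffer : Bool) : Prop :=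
  distance_km = none ∨ resolution_km ≠ some 0
instance (distance_km : Option Int) (resolution_km : Option Int) (previous_domain_cells : Int) (margin_cells_each_side : Int) (force_buffer : Bool) : Decidable (Pre_find_min_number_wrf_cells distance_km resolution_km previous_domain_cells margin_cells_each_side force_buffer) := by unfold Pre_find_min_number_wrf_cells; infer_instance

def pvWitness_find_min_number_wrf_cells : Option Int × Option Int × Int × Int × Bool := (some 100, some 7, 30, 9, true)

def Spec_find_min_number_wrf_cells (distance_km : Option Int) (resolution_km : Option Int) (previous_domain_cells : Int) (margin_cells_each_side : Int) (force_buffer : Bool) (out : Int) : Prop := out = find_min_number_wrf_cells_alt distance_km resolution_km previous_domain_cells margin_cells_each_side force_buffer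
instance (distance_km : Option Int) (resolution_km : Option Int) (previous_domain_cells : Int) (margin_cells_each_side : Int) (force_buffer : Bool) (out : Int) : Decidable (Spec_find_min_number_wrf_cells distance_km resolution_km previous_domain_cells margin_cells_each_side force_buffer out) := by unfold Spec_find_min_number_wrf_cells; infer_instance

-- ===== CLAIM (what is proved, stated in full; the proofs are below) =====
def Claim_equal_find_min_number_wrf_cells : Prop := ∀ (distance_km : Option Int) (resolution_km : Option Int) (previous_domain_cells : Int) (margin_cells_each_side : Int) (force_buffer : Bool), Dom_find_min_number_wrf_cells distance_km resolution_km previous_domain_cells margin_cells_each_side force_buffer → Pre_find_min_number_wrf_cells distance_km resolution_km previous_domain_cells margin_cells_each_side force_buffer → Spec_find_min_number_wrf_cells distance_km resolution_km previous_domain_cells margin_cells_each_side force_buffer (find_min_number_wrf_cells distance_km resolution_km previous_domain_cells margin_cells_each_side force_buffer)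

-- ===== LEMMAS AND PROOFS =====
-- With enough fuel A's loop lands exactly at the closed form B computes.
theorem pvLoopA_eq (fuel : Nat) (m : Int) (h : ((3 - m) % 6).toNat ≤ fuel) :
    pvLoopA fuel m = m + (3 - m) % 6 := by
  induction fuel generalizing m with
  | zero =>
    have h0 : (3 - m) % 6 = 0 := by omega
    simp [pvLoopA, h0]
  | succ fuel ih =>
    unfold pvLoopA
    split
    · rename_i hc
      have hm : m % 6 ≠ 3 := by
        rcases hc with hc | hc
        · simp only [ne_eq, not_not] at hc; omega
        · omega
      rw [ih (m + 1) (by omega)]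
      omega
    · rename_i hc
      simp only [ne_eq, not_or, not_not] at hc
      omega

theorem pvFuel_le (x : Int) : ((3 - x) % 6).toNat ≤ 6 := by omega

-- ===== VERDICT (by name: the statement is the Claim_ definition above) =====
theorem find_min_number_wrf_cells_spec : Claim_equal_find_min_number_wrf_cells := by
  intro d r p m f _ _
  unfold Spec_find_min_number_wrf_cells find_min_number_wrf_cells find_min_number_wrf_cells_alt
  cases d <;> cases r <;> exact pvLoopA_eq 6 _ (pvFuel_le _)
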